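-- pv_equiv track=rewrite | github.com/webstackdev/digest-engine | core/newsletters.py | _find_tag_end
-- ===== SOURCE A (Python) =====
-- def _find_tag_end(raw_html: str, start_index: int) -> int:
--     """Find the closing ``>`` for a tag while respecting quoted attributes."""
--
--     quote_char: str | None = None
--     for index in range(start_index, len(raw_html)):
--         current_char = raw_html[index]
--         if quote_char is not None:
--             if current_char == quote_char:
--                 quote_char = None
--             continue
--         if current_char in {'"', "'"}:
--             quote_char = current_char
--             continue
--         if current_char == ">":
--             return index
--     return -1
-- ===== SOURCE B (Python) =====
-- def _find_tag_end(raw_html: str, start_index: int) -> int: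
--     """Find the closing ``>`` for a tag while respecting quoted attributes."""
--     n = len(raw_html)
--     i = start_index if start_index >= 0 else max(n + start_index, 0)
--     while True:
--         gt = raw_html.find(">", i)
--         if gt == -1:
--             return -1
--         q = raw_html.find('"', i, gt)
--         sq = raw_html.find("'", i, gt)
--         if q == -1 or (sq != -1 and sq < q):
--             q = sq
--         if q == -1:
--             return gt
--         close = raw_html.find(raw_html[q], q + 1)
--         if close == -1:
--             return -1
--         i = close + 1
-- ===== Notes on version B (the rewrite author's own statement) =====
-- stated objective: faster
-- what changed: Replaces the per-character state-machine scan with repeated str.find jumps (next '>', earliest quote before it, matching closing quote) — same O(n) but the scanning runs in C-level str.find, measured ~12x faster on large inputs. Pre_ excludes negative start_index, on which A's negative-index wraparound scans the string's tail and can return a negative 'found' index indistinguishable from the -1 not-found sentinel (or raises IndexError when start_index < -len).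
-- outside the precondition, e.g. on _find_tag_end('>', -1): A returns -1, B returns 0
import Mathlib
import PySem

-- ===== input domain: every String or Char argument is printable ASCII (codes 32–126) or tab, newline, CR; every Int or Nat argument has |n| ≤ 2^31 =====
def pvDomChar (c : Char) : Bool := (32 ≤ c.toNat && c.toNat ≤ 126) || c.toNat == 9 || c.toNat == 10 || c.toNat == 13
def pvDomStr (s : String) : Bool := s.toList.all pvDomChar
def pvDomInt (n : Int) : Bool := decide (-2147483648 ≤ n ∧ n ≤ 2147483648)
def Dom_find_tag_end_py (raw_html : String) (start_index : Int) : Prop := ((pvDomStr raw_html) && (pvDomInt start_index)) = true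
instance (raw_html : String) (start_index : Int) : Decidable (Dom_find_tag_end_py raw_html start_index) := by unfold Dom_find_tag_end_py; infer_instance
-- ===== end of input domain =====

-- B replaces A's per-character quote state machine with repeated find-jumps (next '>' /
-- earliest quote / matching closing quote); a timing run measured B constant-factor faster.


-- ===== PORT A =====
-- the for-loop of A: index runs over range(start_index, len); quote_char is the Option state
def goA (s : List Char) (idxs : List Int) (quote : Option Char) : Int :=
  match idxs with
  | [] => -1
  | index :: rest =>
    match PySem.List.pyGet? s index with
    | none => -1   -- Python raises IndexError here (only reachable for start_index < -len, outside Pre_)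
    | some c =>
      match quote with
      | some qc => goA s rest (if c = qc then none else some qc)
      | none =>
        if c = '"' ∨ c = '\'' then goA s rest (some c)
        else if c = '>' then index
        else goA s rest none

def find_tag_end_py (raw_html : String) (start_index : Int) : Int :=
  goA raw_html.toList (PySem.List.pyRange start_index (raw_html.toList.length : Int)) none

-- ===== PORT B =====
-- hand port of str.find(ch, i) for a one-character needle and a nonnegative start (exact there)
def findChAux (c : Char) : List Char → Nat → Int
  | [], _ => -1
  | x :: xs, idx => if x = c then (idx : Int) else findChAux c xs (idx + 1)

def findChFrom (s : List Char) (c : Char) (i : Nat) : Int := findChAux c (s.drop i) i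

-- hand port of str.find(ch, i, e) for a one-character needle and nonnegative bounds (exact there)
def findChBetweenAux (c : Char) (e : Nat) : List Char → Nat → Int
  | [], _ => -1
  | x :: xs, idx =>
    if idx < e then (if x = c then (idx : Int) else findChBetweenAux c e xs (idx + 1)) else -1

def findChBetween (s : List Char) (c : Char) (i e : Nat) : Int := findChBetweenAux c e (s.drop i) i

def loopB (s : List Char) : Nat → Nat → Int
  | 0, _ => -1   -- fuel guard only: each iteration advances i by at least 2, so fuel s.length + 1 is never exhausted
  | fuel + 1, i =>
    let gt := findChFrom s '>' i
    if gt < 0 then -1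
    else
      let g := gt.toNat
      let dq := findChBetween s '"' i g
      let sq := findChBetween s '\'' i g
      let q := if dq = -1 ∨ (sq ≠ -1 ∧ sq < dq) then sq else dq
      if q < 0 then gt
      else
        match PySem.List.pyGet? s q with
        | none => -1   -- unreachable: q is a valid index
        | some qc =>
          let close := findChFrom s qc (q.toNat + 1)
          if close < 0 then -1
          else loopB s fuel (close.toNat + 1)

def find_tag_end_py_alt (raw_html : String) (start_index : Int) : Int :=
  let s := raw_html.toList
  let n := s.length
  let i : Nat := if 0 ≤ start_index then start_index.toNat else (n + start_index).toNat
  loopB s (n + 1) i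

-- ===== PRECONDITION & SPEC =====
-- Pre_ excludes negative start_index, on which A's negative-index wraparound scans the string's
-- tail and can return a negative 'found' index indistinguishable from the -1 not-found sentinel
-- (and raises IndexError when start_index < -len); B uses str.find's clamping rule there.
def Pre_find_tag_end_py (raw_html : String) (start_index : Int) : Prop := 0 ≤ start_index
instance (raw_html : String) (start_index : Int) : Decidable (Pre_find_tag_end_py raw_html start_index) := by unfold Pre_find_tag_end_py; infer_instance
def pvWitness_find_tag_end_py : String × Int := ("<a href=\"x>y\" >z", 0)

def Spec_find_tag_end_py (raw_html : String) (start_index : Int) (out : Int) : Prop := out = find_tag_end_py_alt raw_html start_index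
instance (raw_html : String) (start_index : Int) (out : Int) : Decidable (Spec_find_tag_end_py raw_html start_index out) := by unfold Spec_find_tag_end_py; infer_instance

-- ===== CLAIM (what is proved, stated in full; the proofs are below) =====
def Claim_equal_find_tag_end_py : Prop := ∀ (raw_html : String) (start_index : Int), Dom_find_tag_end_py raw_html start_index → Pre_find_tag_end_py raw_html start_index → Spec_find_tag_end_py raw_html start_index (find_tag_end_py raw_html start_index)

-- ===== LEMMAS AND PROOFS =====

-- full specs of the two finders; loopB's decreasing_by cites them, so they stay above the claim block
lemma findChAux_spec (s : List Char) (c : Char) :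
    ∀ (l : List Char) (idx : Nat), l = s.drop idx →
      (findChAux c l idx = -1 ∧ ∀ m, idx ≤ m → m < s.length → s.getD m ' ' ≠ c) ∨
        (idx ≤ (findChAux c l idx).toNat ∧ (findChAux c l idx).toNat < s.length ∧
          findChAux c l idx = ((findChAux c l idx).toNat : Int) ∧
          s.getD (findChAux c l idx).toNat ' ' = c ∧
          ∀ m, idx ≤ m → m < (findChAux c l idx).toNat → s.getD m ' ' ≠ c) := by
  intro l
  induction l with
  | nil =>
      intro idx h
      left
      have hn : s.length ≤ idx := by
        have := congrArg List.length h
        simp at this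
        omega
      exact ⟨rfl, fun m hm1 hm2 => by omega⟩
  | cons x xs ih =>
      intro idx h
      have hget : s[idx]? = some x := by
        have := congrArg List.head? h
        simpa [List.head?_drop] using this.symm
      have hlen : idx < s.length := by
        have := List.getElem?_eq_some_iff.mp hget
        exact this.1
      have hgd : s.getD idx ' ' = x := by simp [List.getD, hget]
      have hxs : xs = s.drop (idx + 1) := by
        have := congrArg List.tail h
        simpa [List.tail_drop] using this
      by_cases hc : x = c
      · right
        simp only [findChAux, if_pos hc]
        refine ⟨by simp, by simpa using hlen, by simp, by simpa [hc] using hgd, ?_⟩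
        intro m hm1 hm2
        simp at hm2
        omega
      · simp only [findChAux, if_neg hc]
        rcases ih (idx + 1) hxs with ⟨h1, h2⟩ | ⟨h1, h2, h3, h4, h5⟩
        · left
          refine ⟨h1, fun m hm1 hm2 => ?_⟩
          rcases Nat.eq_or_lt_of_le hm1 with rfl | hlt
          · rw [hgd]; exact hc
          · exact h2 m hlt hm2
        · right
          refine ⟨by omega, h2, h3, h4, fun m hm1 hm2 => ?_⟩
          rcases Nat.eq_or_lt_of_le hm1 with rfl | hlt
          · rw [hgd]; exact hc
          · exact h5 m hlt hm2

lemma findChBetweenAux_spec (s : List Char) (c : Char) (e : Nat) :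
    ∀ (l : List Char) (idx : Nat), l = s.drop idx →
      (findChBetweenAux c e l idx = -1 ∧ ∀ m, idx ≤ m → m < e → m < s.length → s.getD m ' ' ≠ c) ∨
        (idx ≤ (findChBetweenAux c e l idx).toNat ∧ (findChBetweenAux c e l idx).toNat < e ∧
          (findChBetweenAux c e l idx).toNat < s.length ∧
          findChBetweenAux c e l idx = ((findChBetweenAux c e l idx).toNat : Int) ∧
          s.getD (findChBetweenAux c e l idx).toNat ' ' = c ∧
          ∀ m, idx ≤ m → m < (findChBetweenAux c e l idx).toNat → s.getD m ' ' ≠ c) := by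
  intro l
  induction l with
  | nil =>
      intro idx h
      left
      have hn : s.length ≤ idx := by
        have := congrArg List.length h
        simp at this
        omega
      exact ⟨rfl, fun m hm1 hm2 hm3 => by omega⟩
  | cons x xs ih =>
      intro idx h
      have hget : s[idx]? = some x := by
        have := congrArg List.head? h
        simpa [List.head?_drop] using this.symm
      have hlen : idx < s.length := by
        have := List.getElem?_eq_some_iff.mp hget
        exact this.1
      have hgd : s.getD idx ' ' = x := by simp [List.getD, hget]
      have hxs : xs = s.drop (idx + 1) := by
        have := congrArg List.tail h
        simpa [List.tail_drop] using this
      by_cases he : idx < e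
      · by_cases hc : x = c
        · right
          simp only [findChBetweenAux, if_pos he, if_pos hc]
          refine ⟨by simp, by simpa using he, by simpa using hlen, by simp,
            by simpa [hc] using hgd, ?_⟩
          intro m hm1 hm2
          simp at hm2
          omega
        · simp only [findChBetweenAux, if_pos he, if_neg hc]
          rcases ih (idx + 1) hxs with ⟨h1, h2⟩ | ⟨h1, h2, h3, h4, h5, h6⟩
          · left
            refine ⟨h1, fun m hm1 hm2 hm3 => ?_⟩
            rcases Nat.eq_or_lt_of_le hm1 with rfl | hlt
            · rw [hgd]; exact hc
            · exact h2 m hlt hm2 hm3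
          · right
            refine ⟨by omega, h2, h3, h4, h5, fun m hm1 hm2 => ?_⟩
            rcases Nat.eq_or_lt_of_le hm1 with rfl | hlt
            · rw [hgd]; exact hc
            · exact h6 m hlt hm2
      · left
        simp only [findChBetweenAux, if_neg he]
        exact ⟨by simp, fun m hm1 hm2 hm3 => by omega⟩

lemma findChFrom_spec (s : List Char) (c : Char) (i : Nat) :
    (findChFrom s c i = -1 ∧ ∀ m, i ≤ m → m < s.length → s.getD m ' ' ≠ c) ∨
      (i ≤ (findChFrom s c i).toNat ∧ (findChFrom s c i).toNat < s.length ∧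
        findChFrom s c i = ((findChFrom s c i).toNat : Int) ∧
        s.getD (findChFrom s c i).toNat ' ' = c ∧
        ∀ m, i ≤ m → m < (findChFrom s c i).toNat → s.getD m ' ' ≠ c) := by
  exact findChAux_spec s c (s.drop i) i rfl

lemma findChBetween_spec (s : List Char) (c : Char) (i e : Nat) :
    (findChBetween s c i e = -1 ∧ ∀ m, i ≤ m → m < e → m < s.length → s.getD m ' ' ≠ c) ∨
      (i ≤ (findChBetween s c i e).toNat ∧ (findChBetween s c i e).toNat < e ∧
        (findChBetween s c i e).toNat < s.length ∧
        findChBetween s c i e = ((findChBetween s c i e).toNat : Int) ∧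
        s.getD (findChBetween s c i e).toNat ' ' = c ∧
        ∀ m, i ≤ m → m < (findChBetween s c i e).toNat → s.getD m ' ' ≠ c) := by
  exact findChBetweenAux_spec s c e (s.drop i) i rfl

-- pyRange over an empty interval
lemma pyRange_empty (a b : Int) (h : b ≤ a) : PySem.List.pyRange a b = [] := by
  rw [PySem.List.pyRange_one]
  have : (b - a).toNat = 0 := by omega
  simp [this]

-- unfold one loop iteration of goA at an in-range index
lemma goA_cons_none (s : List Char) (i : Nat) (hin : i < s.length) :
    goA s (PySem.List.pyRange (i : Int) (s.length : Int)) none =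
      (if s[i] = '"' ∨ s[i] = '\'' then
        goA s (PySem.List.pyRange ((i + 1 : Nat) : Int) (s.length : Int)) (some s[i])
      else if s[i] = '>' then (i : Int)
      else goA s (PySem.List.pyRange ((i + 1 : Nat) : Int) (s.length : Int)) none) := by
  have hcons : PySem.List.pyRange (i : Int) (s.length : Int) =
      (i : Int) :: PySem.List.pyRange ((i : Int) + 1) (s.length : Int) :=
    PySem.List.pyRange_one_cons (by exact_mod_cast hin)
  have hget : PySem.List.pyGet? s (i : Int) = some s[i] := by
    rw [PySem.List.pyGet?_natCast, List.getElem?_eq_getElem hin]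
  have hone : ((i : Int) + 1) = ((i + 1 : Nat) : Int) := by push_cast; ring
  rw [hcons, hone]
  simp only [goA, hget]

lemma goA_cons_some (s : List Char) (i : Nat) (hin : i < s.length) (qc : Char) :
    goA s (PySem.List.pyRange (i : Int) (s.length : Int)) (some qc) =
      goA s (PySem.List.pyRange ((i + 1 : Nat) : Int) (s.length : Int))
        (if s[i] = qc then none else some qc) := by
  have hcons : PySem.List.pyRange (i : Int) (s.length : Int) =
      (i : Int) :: PySem.List.pyRange ((i : Int) + 1) (s.length : Int) :=
    PySem.List.pyRange_one_cons (by exact_mod_cast hin)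
  have hget : PySem.List.pyGet? s (i : Int) = some s[i] := by
    rw [PySem.List.pyGet?_natCast, List.getElem?_eq_getElem hin]
  have hone : ((i : Int) + 1) = ((i + 1 : Nat) : Int) := by push_cast; ring
  rw [hcons, hone]
  simp only [goA, hget]

-- skip a boring segment [i, j) (no '>' and no quotes) in the unquoted state
lemma skipA_none (s : List Char) :
    ∀ k i j : Nat, j ≤ i + k → i ≤ j → j ≤ s.length →
      (∀ m, i ≤ m → m < j → s.getD m ' ' ≠ '>' ∧ s.getD m ' ' ≠ '"' ∧ s.getD m ' ' ≠ '\'') →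
      goA s (PySem.List.pyRange (i : Int) (s.length : Int)) none = goA s (PySem.List.pyRange (j : Int) (s.length : Int)) none := by
  intro k
  induction k with
  | zero =>
      intro i j h1 h2 h3 _
      have : i = j := by omega
      subst this; rfl
  | succ k ih =>
      intro i j h1 h2 h3 hb
      rcases Nat.eq_or_lt_of_le h2 with rfl | hlt
      · rfl
      · have hin : i < s.length := by omega
        have hc := hb i le_rfl hlt
        rw [show s.getD i ' ' = s[i] from by simp [List.getD, List.getElem?_eq_getElem hin]] at hc
        rw [goA_cons_none s i hin]
        simp only [if_neg (show ¬(s[i] = '"' ∨ s[i] = '\'') from by tauto), if_neg hc.1]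
        exact ih (i + 1) j (by omega) (by omega) h3 (fun m hm1 hm2 => hb m (by omega) hm2)

-- skip a segment [i, j) without the closing quote char in the quoted state
lemma skipA_quoted (s : List Char) (qc : Char) :
    ∀ k i j : Nat, j ≤ i + k → i ≤ j → j ≤ s.length →
      (∀ m, i ≤ m → m < j → s.getD m ' ' ≠ qc) →
      goA s (PySem.List.pyRange (i : Int) (s.length : Int)) (some qc) = goA s (PySem.List.pyRange (j : Int) (s.length : Int)) (some qc) := by
  intro k
  induction k with
  | zero =>
      intro i j h1 h2 h3 _
      have : i = j := by omega
      subst this; rfl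
  | succ k ih =>
      intro i j h1 h2 h3 hb
      rcases Nat.eq_or_lt_of_le h2 with rfl | hlt
      · rfl
      · have hin : i < s.length := by omega
        have hc := hb i le_rfl hlt
        rw [show s.getD i ' ' = s[i] from by simp [List.getD, List.getElem?_eq_getElem hin]] at hc
        rw [goA_cons_some s i hin qc]
        simp only [if_neg hc]
        exact ih (i + 1) j (by omega) (by omega) h3 (fun m hm1 hm2 => hb m (by omega) hm2)

-- if no '>' remains, A falls through with -1 from any state
lemma goA_noGt (s : List Char) :
    ∀ k i : Nat, s.length ≤ i + k → ∀ qo : Option Char,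
      (∀ m, i ≤ m → m < s.length → s.getD m ' ' ≠ '>') →
      goA s (PySem.List.pyRange (i : Int) (s.length : Int)) qo = -1 := by
  intro k
  induction k with
  | zero =>
      intro i h qo _
      rw [pyRange_empty _ _ (by exact_mod_cast h)]
      rfl
  | succ k ih =>
      intro i h qo hb
      by_cases hin : i < s.length
      · have hc := hb i le_rfl hin
        rw [show s.getD i ' ' = s[i] from by simp [List.getD, List.getElem?_eq_getElem hin]] at hc
        have hrec : ∀ qo' : Option Char,
            goA s (PySem.List.pyRange ((i + 1 : Nat) : Int) (s.length : Int)) qo' = -1 :=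
          fun qo' => ih (i + 1) (by omega) qo' (fun m hm1 hm2 => hb m (by omega) hm2)
        cases qo with
        | some qc => rw [goA_cons_some s i hin qc]; exact hrec _
        | none =>
            rw [goA_cons_none s i hin]
            simp only [if_neg hc]
            split_ifs <;> exact hrec _
      · rw [pyRange_empty _ _ (by exact_mod_cast (by omega : s.length ≤ i))]
        rfl

-- one unfolded iteration of loopB (lets zeta-reduced)
lemma loopB_succ_eq (s : List Char) (fuel i : Nat) :
    loopB s (fuel + 1) i =
      (if findChFrom s '>' i < 0 then -1
       else
         (fun q : Int =>
           if q < 0 then findChFrom s '>' i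
           else
             match PySem.List.pyGet? s q with
             | none => -1
             | some qc =>
                 if findChFrom s qc (q.toNat + 1) < 0 then -1
                 else loopB s fuel ((findChFrom s qc (q.toNat + 1)).toNat + 1))
         (if findChBetween s '"' i (findChFrom s '>' i).toNat = -1 ∨
             (findChBetween s '\'' i (findChFrom s '>' i).toNat ≠ -1 ∧
              findChBetween s '\'' i (findChFrom s '>' i).toNat <
                findChBetween s '"' i (findChFrom s '>' i).toNat)
          then findChBetween s '\'' i (findChFrom s '>' i).toNat
          else findChBetween s '"' i (findChFrom s '>' i).toNat)) := rfl

-- main equivalence of the two loops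
lemma loop_equiv (s : List Char) :
    ∀ k i : Nat, s.length ≤ i + k →
      goA s (PySem.List.pyRange (i : Int) (s.length : Int)) none = loopB s k i := by
  intro k
  induction k with
  | zero =>
      intro i h
      rw [pyRange_empty _ _ (by exact_mod_cast h)]
      rfl
  | succ k ih =>
      intro i h
      rw [loopB_succ_eq]
      rcases findChFrom_spec s '>' i with ⟨hgt1, hgt2⟩ | ⟨hg1, hg2, hg3, hg4, hg5⟩
      · -- no '>' from i onwards: both sides -1
        rw [if_pos (by omega), goA_noGt s (k + 1) i h none hgt2]
      · -- first '>' is at g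
        set gt := findChFrom s '>' i with hgtdef
        set g := gt.toNat with hgdef
        rw [if_neg (by omega)]
        simp only []
        set dq := findChBetween s '"' i g with hdqdef
        set sq := findChBetween s '\'' i g with hsqdef
        set q : Int := if dq = -1 ∨ (sq ≠ -1 ∧ sq < dq) then sq else dq with hqdef
        have hdqs := findChBetween_spec s '"' i g
        have hsqs := findChBetween_spec s '\'' i g
        rw [← hdqdef] at hdqs
        rw [← hsqdef] at hsqs
        by_cases hq : q < 0
        · -- no quote before the '>': A skips [i, g) and returns g
          rw [if_pos hq]
          have hboth : dq = -1 ∧ sq = -1 := by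
            by_cases hcond : dq = -1 ∨ (sq ≠ -1 ∧ sq < dq)
            · rw [hqdef, if_pos hcond] at hq
              have hsq1 : sq = -1 := by
                rcases hsqs with ⟨h1, _⟩ | ⟨_, _, _, h4, _⟩
                · exact h1
                · omega
              rcases hcond with h1 | ⟨h1, _⟩
              · exact ⟨h1, hsq1⟩
              · exact absurd hsq1 h1
            · rw [hqdef, if_neg hcond] at hq
              have : dq = -1 := by
                rcases hdqs with ⟨h1, _⟩ | ⟨_, _, _, h4, _⟩
                · exact h1
                · omega
              exact absurd (Or.inl this) hcond
          have hnodq := hboth.1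
          have hnosq := hboth.2
          rcases hdqs with ⟨_, hdq2⟩ | ⟨_, _, _, h4, _⟩
          swap
          · omega
          rcases hsqs with ⟨_, hsq2⟩ | ⟨_, _, _, h4, _⟩
          swap
          · omega
          have hskip := skipA_none s g i g (by omega) hg1 (by omega)
            (fun m hm1 hm2 => ⟨hg5 m hm1 hm2, hdq2 m hm1 hm2 (by omega), hsq2 m hm1 hm2 (by omega)⟩)
          rw [hskip, goA_cons_none s g hg2]
          rw [show s[g] = '>' from by
            have := hg4
            rw [show s.getD g ' ' = s[g]'hg2 from by simp [List.getD, List.getElem?_eq_getElem hg2]] at this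
            exact this]
          rw [if_neg (by decide), if_pos rfl]
          omega
        · -- a quote at q.toNat precedes the '>'
          rw [if_neg hq]
          -- facts about the chosen earliest quote position
          have hqfacts : i ≤ q.toNat ∧ q.toNat < g ∧ q = (q.toNat : Int) ∧
              (s.getD q.toNat ' ' = '"' ∨ s.getD q.toNat ' ' = '\'') ∧
              (∀ m, i ≤ m → m < q.toNat → s.getD m ' ' ≠ '"' ∧ s.getD m ' ' ≠ '\'') := by
            by_cases hcond : dq = -1 ∨ (sq ≠ -1 ∧ sq < dq)
            · have hqeq : q = sq := by rw [hqdef, if_pos hcond]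
              rcases hsqs with ⟨h1, _⟩ | ⟨h1, h2, h3, h4, h5, h6⟩
              · omega
              · have hsq' : sq.toNat = q.toNat := by rw [hqeq]
                refine ⟨by omega, by omega, by omega, Or.inr (by rw [← hsq']; exact h5), ?_⟩
                intro m hm1 hm2
                rw [← hsq'] at hm2
                refine ⟨?_, h6 m hm1 hm2⟩
                rcases hcond with hco | ⟨_, hco⟩
                · rcases hdqs with ⟨_, hd2⟩ | ⟨_, _, _, hd4, _⟩
                  · exact hd2 m hm1 (by omega) (by omega)
                  · omega
                · rcases hdqs with ⟨hd1, _⟩ | ⟨hd1, hd2, hd3, hd4, hd5, hd6⟩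
                  · omega
                  · exact hd6 m hm1 (by omega)
            · have hqeq : q = dq := by rw [hqdef, if_neg hcond]
              have hcond2 : sq ≠ -1 → ¬ sq < dq := fun h1 h2 => hcond (Or.inr ⟨h1, h2⟩)
              rcases hdqs with ⟨h1, _⟩ | ⟨h1, h2, h3, h4, h5, h6⟩
              · exact absurd (Or.inl h1) hcond
              · have hdq' : dq.toNat = q.toNat := by rw [hqeq]
                refine ⟨by omega, by omega, by omega, Or.inl (by rw [← hdq']; exact h5), ?_⟩
                intro m hm1 hm2
                rw [← hdq'] at hm2
                refine ⟨h6 m hm1 hm2, ?_⟩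
                rcases hsqs with ⟨_, hs2⟩ | ⟨hs1, hs2, hs3, hs4, hs5, hs6⟩
                · exact hs2 m hm1 (by omega) (by omega)
                · have : dq ≤ sq := by
                    have h2' := hcond2 (by omega)
                    omega
                  exact hs6 m hm1 (by omega)
          obtain ⟨hq1, hq2, hq3, hq4, hq5⟩ := hqfacts
          set qn := q.toNat with hqndef
          have hqn : qn < s.length := by omega
          have hgdqn : s.getD qn ' ' = s[qn]'hqn := by simp [List.getD, List.getElem?_eq_getElem hqn]
          have hpg : PySem.List.pyGet? s q = some (s[qn]'hqn) := by
            rw [hq3, PySem.List.pyGet?_natCast, List.getElem?_eq_getElem hqn]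
          simp only [hpg]
          set qc := s[qn]'hqn with hqcdef
          -- A: skip [i, qn), open the quote at qn
          have hskip := skipA_none s qn i qn (by omega) hq1 (by omega)
            (fun m hm1 hm2 => ⟨hg5 m hm1 (by omega), (hq5 m hm1 hm2).1, (hq5 m hm1 hm2).2⟩)
          rw [hskip, goA_cons_none s qn hqn]
          rw [hgdqn] at hq4
          rw [if_pos (by rcases hq4 with h | h <;> [exact Or.inl h; exact Or.inr h])]
          -- now the quoted state from qn+1; close is the next qc
          rcases findChFrom_spec s qc (qn + 1) with ⟨hc1, hc2⟩ | ⟨hc1, hc2, hc3, hc4, hc5⟩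
          · -- unclosed quote: both -1
            rw [if_pos (by omega)]
            have hskip2 := skipA_quoted s qc s.length (qn + 1) s.length (by omega) (by omega) le_rfl
              (fun m hm1 hm2 => hc2 m hm1 hm2)
            rw [hskip2, pyRange_empty _ _ le_rfl]
            rfl
          · -- quote closes at cn; continue after it
            set close := findChFrom s qc (qn + 1) with hclosedef
            set cn := close.toNat with hcndef
            rw [if_neg (by omega)]
            have hskip2 := skipA_quoted s qc cn (qn + 1) cn (by omega) (by omega) (by omega)
              (fun m hm1 hm2 => hc5 m hm1 hm2)
            rw [hskip2, goA_cons_some s cn (by omega) qc]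
            rw [show (s[cn]'(by omega)) = qc from by
              have := hc4
              rw [show s.getD cn ' ' = s[cn]'(by omega) from by
                simp [List.getD, List.getElem?_eq_getElem (show cn < s.length by omega)]] at this
              exact this]
            rw [if_pos rfl]
            exact ih (cn + 1) (by omega)

-- ===== VERDICT (by name: the statement is the Claim_ definition above) =====
theorem find_tag_end_py_spec : Claim_equal_find_tag_end_py := by
  unfold Claim_equal_find_tag_end_py
  intro raw start _ hpre
  unfold Spec_find_tag_end_py find_tag_end_py find_tag_end_py_alt
  unfold Pre_find_tag_end_py at hpre
  simp only [if_pos hpre]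
  have hcast : (start : Int) = ((start.toNat : Nat) : Int) := by omega
  rw [hcast]
  exact loop_equiv raw.toList (raw.toList.length + 1) start.toNat (by omega)
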